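-- pv_equiv track=rewrite | github.com/antremis/ImCrypt | Utils.py | unhashOrder
-- ===== SOURCE A (Python) =====
-- def unhashOrder(hashed_order):
--     order = []
--     for i, idx in enumerate(hashed_order):
--         if i%2==0:
--             order.append(ord(idx) - ord('a'))
--         else:
--             order.append(ord(idx) - ord('A'))
--     return order
-- ===== SOURCE B (Python) =====
-- def unhashOrder(hashed_order):
--     order = []
--     for i in range(0, len(hashed_order), 2):
--         chunk = hashed_order[i:i+2]
--         order.append(ord(chunk[0]) - ord('a'))
--         if len(chunk) > 1:
--             order.append(ord(chunk[1]) - ord('A'))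
--     return order
-- ===== Notes on version B (the rewrite author's own statement) =====
-- stated objective: alternative
-- what changed: Replaces the per-character enumerate loop with an i%2 parity branch by a stride-2 pass over consecutive character pairs that emits two values per iteration (base 'a' then base 'A'), with the trailing character of an odd-length string handled as a one-element chunk.
import Mathlib
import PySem

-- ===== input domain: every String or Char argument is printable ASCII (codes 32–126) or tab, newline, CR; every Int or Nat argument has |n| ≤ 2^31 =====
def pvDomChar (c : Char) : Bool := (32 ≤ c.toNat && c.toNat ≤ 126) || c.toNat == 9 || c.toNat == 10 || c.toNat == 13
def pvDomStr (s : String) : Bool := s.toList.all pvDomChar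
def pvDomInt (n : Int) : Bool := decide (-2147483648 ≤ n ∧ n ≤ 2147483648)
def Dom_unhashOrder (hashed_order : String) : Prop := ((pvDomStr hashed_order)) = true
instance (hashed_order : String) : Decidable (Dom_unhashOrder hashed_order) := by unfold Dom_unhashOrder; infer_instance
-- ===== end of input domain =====

-- B replaces A's per-character parity branch by a stride-2 pass over character pairs (alternative decomposition, same cost).


-- ===== PORT A =====
-- for i, idx in enumerate(hashed_order): append ord(idx)-ord('a') on even i, ord(idx)-ord('A') on odd i
def unhashOrder (hashed_order : String) : List Int :=
  (PySem.List.enumerate hashed_order.toList 0).foldl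
    (fun order p =>
      if PySem.Int.mod p.1 2 == 0 then order ++ [((p.2.toNat : Int) - 97)]
      else order ++ [((p.2.toNat : Int) - 65)])
    []

-- ===== PORT B =====
-- stride-2 loop over chunks hashed_order[i:i+2]: first char base 'a', second (if present) base 'A'
def unhashOrderAltGo : List Char → List Int
  | [] => []
  | [c] => [((c.toNat : Int) - 97)]
  | c :: d :: rest => ((c.toNat : Int) - 97) :: ((d.toNat : Int) - 65) :: unhashOrderAltGo rest

def unhashOrder_alt (hashed_order : String) : List Int :=
  unhashOrderAltGo hashed_order.toList

-- ===== PRECONDITION & SPEC =====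
def Spec_unhashOrder (hashed_order : String) (out : List Int) : Prop := out = unhashOrder_alt hashed_order
instance (hashed_order : String) (out : List Int) : Decidable (Spec_unhashOrder hashed_order out) := by unfold Spec_unhashOrder; infer_instance

-- ===== CLAIM (what is proved, stated in full; the proofs are below) =====
def Claim_equal_unhashOrder : Prop := ∀ (hashed_order : String), Dom_unhashOrder hashed_order → Spec_unhashOrder hashed_order (unhashOrder hashed_order)

-- ===== LEMMAS AND PROOFS =====

theorem unhashOrder_foldl_go (l : List Char) : ∀ (n : Nat) (acc : List Int),
    (PySem.List.enumerate l ((2 * n : Nat) : Int)).foldl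
      (fun order p =>
        if PySem.Int.mod p.1 2 == 0 then order ++ [((p.2.toNat : Int) - 97)]
        else order ++ [((p.2.toNat : Int) - 65)])
      acc = acc ++ unhashOrderAltGo l := by
  induction l using unhashOrderAltGo.induct with
  | case1 => intro n acc; simp [PySem.List.enumerate, unhashOrderAltGo]
  | case2 c =>
      intro n acc
      simp [PySem.List.enumerate, unhashOrderAltGo]
  | case3 c d rest ih =>
      intro n acc
      have h0 : PySem.Int.mod ((2 * n : Nat) : Int) 2 = 0 := by
        rw [PySem.Int.mod_eq_emod_of_pos (by norm_num)]; omega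
      have h1 : PySem.Int.mod (((2 * n : Nat) : Int) + 1) 2 = 1 := by
        rw [PySem.Int.mod_eq_emod_of_pos (by norm_num)]; omega
      have h2 : ((2 * n : Nat) : Int) + 1 + 1 = ((2 * (n + 1) : Nat) : Int) := by push_cast; ring
      simp only [PySem.List.enumerate_cons, List.foldl_cons, h0, h1, h2,
        show ((0 : Int) == 0) = true from rfl, show ((1 : Int) == 0) = false from rfl,
        if_true]
      rw [ih (n + 1)]
      simp [unhashOrderAltGo]

-- ===== VERDICT (by name: the statement is the Claim_ definition above) =====
theorem unhashOrder_spec : Claim_equal_unhashOrder := by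
  intro s _
  show unhashOrder s = unhashOrder_alt s
  have := unhashOrder_foldl_go s.toList 0 []
  simpa [unhashOrder, unhashOrder_alt] using this
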